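-- pv_equiv track=rewrite | github.com/mmith9/LeetCode | 3047. Find the Largest Area of Square Inside Two Rectangles.py | largestSquareArea
-- ===== SOURCE A (Python) =====
-- from typing import List
--
-- def largestSquareArea(bottomLeft: List[List[int]], topRight: List[List[int]]) -> int:
--     # dst = [(bottomLeft[i][0], bottomLeft[i][1], topRight[i][0],topRight[i][1]) for i in range(len(bottomLeft))]
--     dst = []
--     for i in range(len(bottomLeft)):
--         a,b = bottomLeft[i]
--         x,y = topRight[i]
--         dst.append((a,b,x,y))
--
--     # dst = [(a,b,c,d) for (a,b),(c,d) in zip(bottomLeft, topRight)]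
--
--     dst.sort(key = lambda x : x[0]+x[1])
--
--     res = 0
--     for i in range(len(dst)-1):
--         a1,b1,c1,d1 = dst[i]
--         if c1-a1 <= res or d1-b1 <= res:
--             continue
--         cur_min = c1+d1-res
--         for a2,b2,c2,d2 in dst[i+1:]:
--             if a2+b2 >= cur_min:
--                 break
--             if c2-a2 <= res or d2-b2 <= res:
--                 continue
--             down = a1 if a1>=a2 else a2
--             up = c1 if c1<=c2 else c2
--             if up - down <= res:
--                 continue
--             left = b1 if b1>=b2 else b2
--             right = d1 if d1<=d2 else d2
--             if right-left <= res:
--                 continue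
--             res = min(up-down, right-left)
--             cur_min = c1+d1-res
--
--     return res*res
-- ===== SOURCE B (Python) =====
-- from typing import List
--
-- def largestSquareArea(bottomLeft: List[List[int]], topRight: List[List[int]]) -> int:
--     rects = list(zip(bottomLeft, topRight))
--     best = 0
--     for i, ((a1, b1), (c1, d1)) in enumerate(rects):
--         for (a2, b2), (c2, d2) in rects[i + 1:]:
--             w = min(c1, c2) - max(a1, a2)
--             h = min(d1, d2) - max(b1, b2)
--             if w > 0 and h > 0:
--                 best = max(best, min(w, h))
--     return best * best
-- ===== Notes on version B (the rewrite author's own statement) =====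
-- stated objective: simpler
-- what changed: Replaced the sort-by-(x+y) plus break/continue pruned scan with a plain all-pairs nested loop over zip(bottomLeft, topRight) that keeps the running maximum positive intersection side; no sorting, no cur_min bound, no pruning.
import Mathlib
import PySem

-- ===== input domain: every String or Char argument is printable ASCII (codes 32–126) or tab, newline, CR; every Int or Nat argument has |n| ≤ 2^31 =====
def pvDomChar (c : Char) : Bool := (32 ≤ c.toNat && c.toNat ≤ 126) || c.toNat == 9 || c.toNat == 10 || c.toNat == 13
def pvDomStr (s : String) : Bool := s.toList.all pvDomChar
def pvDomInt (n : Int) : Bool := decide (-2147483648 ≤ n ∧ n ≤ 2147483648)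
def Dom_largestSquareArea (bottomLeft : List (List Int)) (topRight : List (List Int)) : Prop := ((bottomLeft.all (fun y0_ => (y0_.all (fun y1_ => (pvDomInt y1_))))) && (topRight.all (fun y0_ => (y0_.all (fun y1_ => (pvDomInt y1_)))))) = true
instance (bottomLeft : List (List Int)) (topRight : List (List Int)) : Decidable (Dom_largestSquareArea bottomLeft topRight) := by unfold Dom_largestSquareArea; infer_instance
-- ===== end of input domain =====

-- B replaces A's sort-by-(x+y) + break/continue pruned scan with a plain all-pairs
-- nested loop keeping the running maximum positive intersection side (simpler; same result).


-- ===== PORT A =====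
-- 'a, b = xs[i]' (tuple unpacking of a 2-element row): exact under Pre_ (row exists, length 2)
def pvRow (xs : List (List Int)) (i : Int) : Int × Int :=
  match PySem.List.pyGet? xs i with
  | some [a, b] => (a, b)
  | _ => (0, 0)

-- inner 'for a2,b2,c2,d2 in dst[i+1:]' with break/continue; state: res and cur_min
def pvInnerA (a1 b1 c1 d1 : Int) : List (Int × Int × Int × Int) → Int → Int → Int
  | [], res, _ => res
  | (a2, b2, c2, d2) :: t, res, curMin =>
    if curMin ≤ a2 + b2 then res                                    -- break
    else if c2 - a2 ≤ res ∨ d2 - b2 ≤ res then pvInnerA a1 b1 c1 d1 t res curMin  -- continue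
    else
      let down := if a2 ≤ a1 then a1 else a2
      let up := if c1 ≤ c2 then c1 else c2
      if up - down ≤ res then pvInnerA a1 b1 c1 d1 t res curMin     -- continue
      else
        let left := if b2 ≤ b1 then b1 else b2
        let right := if d1 ≤ d2 then d1 else d2
        if right - left ≤ res then pvInnerA a1 b1 c1 d1 t res curMin  -- continue
        else
          let res' := min (up - down) (right - left)
          pvInnerA a1 b1 c1 d1 t res' (c1 + d1 - res')

-- outer 'for i in range(len(dst)-1)': recursing through every suffix is the same loop,
-- since the last element's inner slice dst[i+1:] is empty and its iteration is a no-op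
def pvOuterA : List (Int × Int × Int × Int) → Int → Int
  | [], res => res
  | (a1, b1, c1, d1) :: t, res =>
    pvOuterA t (if c1 - a1 ≤ res ∨ d1 - b1 ≤ res then res
                else pvInnerA a1 b1 c1 d1 t res (c1 + d1 - res))

def largestSquareArea (bottomLeft : List (List Int)) (topRight : List (List Int)) : Int :=
  let dst := (PySem.List.pyRange 0 (bottomLeft.length : Int) 1).foldl
    (fun acc i => acc ++ [((pvRow bottomLeft i).1, (pvRow bottomLeft i).2,
                           (pvRow topRight i).1, (pvRow topRight i).2)]) []
  let dst := PySem.List.sorted dst (fun r => r.1 + r.2.1) false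
  let res := pvOuterA dst 0
  res * res

-- ===== PORT B =====
-- '((a,b),(c,d))' unpacking of one zipped pair: exact under Pre_ (rows have length 2)
def pvRect : List Int × List Int → Int × Int × Int × Int
  | ([a, b], [c, d]) => (a, b, c, d)
  | _ => (0, 0, 0, 0)

def pvStepB (a1 b1 c1 d1 : Int) (best : Int) : Int × Int × Int × Int → Int
  | (a2, b2, c2, d2) =>
    let w := min c1 c2 - max a1 a2
    let h := min d1 d2 - max b1 b2
    if 0 < w ∧ 0 < h then max best (min w h) else best

-- 'for i, r1 in enumerate(rects): for r2 in rects[i+1:]'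
def pvPairsB : List (Int × Int × Int × Int) → Int → Int
  | [], best => best
  | (a1, b1, c1, d1) :: t, best => pvPairsB t (t.foldl (pvStepB a1 b1 c1 d1) best)

def largestSquareArea_alt (bottomLeft : List (List Int)) (topRight : List (List Int)) : Int :=
  let rects := (bottomLeft.zip topRight).map pvRect
  let best := pvPairsB rects 0
  best * best

-- ===== PRECONDITION & SPEC =====
-- Pre_: exactly where A returns normally: every bottomLeft row and every used topRight row
-- unpacks as a pair, and topRight is long enough for every index A reads.
def Pre_largestSquareArea (bottomLeft : List (List Int)) (topRight : List (List Int)) : Prop :=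
  bottomLeft.length ≤ topRight.length ∧
  (∀ r ∈ bottomLeft, r.length = 2) ∧
  (∀ r ∈ topRight.take bottomLeft.length, r.length = 2)
instance (bottomLeft : List (List Int)) (topRight : List (List Int)) : Decidable (Pre_largestSquareArea bottomLeft topRight) := by unfold Pre_largestSquareArea; infer_instance

def pvWitness_largestSquareArea : List (List Int) × List (List Int) :=
  ([[0, 0], [1, 1]], [[3, 3], [4, 4]])

def Spec_largestSquareArea (bottomLeft : List (List Int)) (topRight : List (List Int)) (out : Int) : Prop := out = largestSquareArea_alt bottomLeft topRight
instance (bottomLeft : List (List Int)) (topRight : List (List Int)) (out : Int) : Decidable (Spec_largestSquareArea bottomLeft topRight out) := by unfold Spec_largestSquareArea; infer_instance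

-- ===== CLAIM (what is proved, stated in full; the proofs are below) =====
def Claim_equal_largestSquareArea : Prop := ∀ (bottomLeft : List (List Int)) (topRight : List (List Int)), Dom_largestSquareArea bottomLeft topRight → Pre_largestSquareArea bottomLeft topRight → Spec_largestSquareArea bottomLeft topRight (largestSquareArea bottomLeft topRight)


-- ===== LEMMAS AND PROOFS =====

-- the (clamped) common square side of two rectangles: 0 if they do not properly overlap
def pvS : Int × Int × Int × Int → Int × Int × Int × Int → Int
  | (a1, b1, c1, d1), (a2, b2, c2, d2) =>
    let w := min c1 c2 - max a1 a2
    let h := min d1 d2 - max b1 b2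
    if 0 < w ∧ 0 < h then min w h else 0

-- canonical all-(later-)pairs maximum
def pvF : List (Int × Int × Int × Int) → Int → Int
  | [], r => r
  | p :: t, r => pvF t (t.foldl (fun b q => max b (pvS p q)) r)

theorem pvS_comm (p q : Int × Int × Int × Int) : pvS p q = pvS q p := by
  obtain ⟨a1, b1, c1, d1⟩ := p; obtain ⟨a2, b2, c2, d2⟩ := q
  simp only [pvS]
  rw [min_comm c1 c2, max_comm a1 a2, min_comm d1 d2, max_comm b1 b2]

theorem pv_foldl_max_le (f : Int × Int × Int × Int → Int) :
    ∀ (l : List (Int × Int × Int × Int)) (b : Int), (∀ q ∈ l, f q ≤ b) →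
      l.foldl (fun b q => max b (f q)) b = b := by
  intro l
  induction l with
  | nil => intro b _; rfl
  | cons q t ih =>
    intro b h
    simp only [List.foldl_cons]
    rw [max_eq_left (h q (by simp))]
    exact ih b (fun q' hq' => h q' (by simp [hq']))

theorem pv_le_foldl_max (f : Int × Int × Int × Int → Int) :
    ∀ (l : List (Int × Int × Int × Int)) (b : Int),
      b ≤ l.foldl (fun b q => max b (f q)) b := by
  intro l
  induction l with
  | nil => intro b; exact le_refl b
  | cons q t ih =>
    intro b
    simp only [List.foldl_cons]
    exact le_trans (le_max_left b (f q)) (ih (max b (f q)))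

theorem pv_foldl_max_out (f : Int × Int × Int × Int → Int) :
    ∀ (l : List (Int × Int × Int × Int)) (v c : Int),
      l.foldl (fun b q => max b (f q)) (max v c) =
        max (l.foldl (fun b q => max b (f q)) v) c := by
  intro l
  induction l with
  | nil => intro v c; rfl
  | cons q t ih =>
    intro v c
    simp only [List.foldl_cons]
    rw [max_right_comm v c (f q), ih]

theorem pv_foldl_max_perm (f : Int × Int × Int × Int → Int)
    {l₁ l₂ : List (Int × Int × Int × Int)} (p : l₁.Perm l₂) :
    ∀ b, l₁.foldl (fun b q => max b (f q)) b = l₂.foldl (fun b q => max b (f q)) b := by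
  induction p with
  | nil => intro b; rfl
  | cons x _ ih => intro b; simp only [List.foldl_cons]; exact ih _
  | swap x y l =>
    intro b
    simp only [List.foldl_cons]
    rw [max_right_comm b (f y) (f x)]
  | trans _ _ ih₁ ih₂ => intro b; rw [ih₁, ih₂]

theorem pv_gg_comm (x y : Int × Int × Int × Int) :
    ∀ (l : List (Int × Int × Int × Int)) (v : Int),
      l.foldl (fun b q => max b (pvS x q)) (l.foldl (fun b q => max b (pvS y q)) v) =
      l.foldl (fun b q => max b (pvS y q)) (l.foldl (fun b q => max b (pvS x q)) v) := by
  intro l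
  induction l with
  | nil => intro v; rfl
  | cons q t ih =>
    intro v
    simp only [List.foldl_cons]
    rw [pv_foldl_max_out (pvS y ·) t v (pvS y q),
        pv_foldl_max_out (pvS x ·) t
          (max (List.foldl (fun b q => max b (pvS y q)) v t) (pvS y q)) (pvS x q),
        pv_foldl_max_out (pvS x ·) t
          (List.foldl (fun b q => max b (pvS y q)) v t) (pvS y q),
        pv_foldl_max_out (pvS x ·) t v (pvS x q),
        pv_foldl_max_out (pvS y ·) t
          (max (List.foldl (fun b q => max b (pvS x q)) v t) (pvS x q)) (pvS y q),
        pv_foldl_max_out (pvS y ·) t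
          (List.foldl (fun b q => max b (pvS x q)) v t) (pvS x q),
        ih v]
    exact max_right_comm _ _ _

theorem pvF_perm {l₁ l₂ : List (Int × Int × Int × Int)} (p : l₁.Perm l₂) :
    ∀ r, pvF l₁ r = pvF l₂ r := by
  induction p with
  | nil => intro r; rfl
  | cons x p ih =>
    intro r
    simp only [pvF]
    rw [pv_foldl_max_perm (pvS x ·) p, ih]
  | swap x y l =>
    intro r
    simp only [pvF, List.foldl_cons]
    rw [pvS_comm y x,
        pv_foldl_max_out (pvS y ·) l r (pvS x y),
        pv_foldl_max_out (pvS x ·) l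
          (List.foldl (fun b q => max b (pvS y q)) r l) (pvS x y),
        pv_foldl_max_out (pvS x ·) l r (pvS x y),
        pv_foldl_max_out (pvS y ·) l
          (List.foldl (fun b q => max b (pvS x q)) r l) (pvS x y),
        pv_gg_comm x y l r]
  | trans _ _ ih₁ ih₂ => intro r; rw [ih₁, ih₂]

-- B equals the canonical form
theorem pv_foldlB_eq (a1 b1 c1 d1 : Int) :
    ∀ (t : List (Int × Int × Int × Int)) (b : Int), 0 ≤ b →
      t.foldl (pvStepB a1 b1 c1 d1) b =
        t.foldl (fun b q => max b (pvS (a1, b1, c1, d1) q)) b := by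
  intro t
  induction t with
  | nil => intro b _; rfl
  | cons q t ih =>
    intro b hb
    obtain ⟨a2, b2, c2, d2⟩ := q
    simp only [List.foldl_cons]
    have hstep : pvStepB a1 b1 c1 d1 b (a2, b2, c2, d2) =
        max b (pvS (a1, b1, c1, d1) (a2, b2, c2, d2)) := by
      simp only [pvStepB, pvS]
      split_ifs with h
      · rfl
      · omega
    rw [hstep]
    exact ih _ (le_trans hb (le_max_left _ _))

theorem pvPairsB_eq_pvF :
    ∀ (l : List (Int × Int × Int × Int)) (b : Int), 0 ≤ b → pvPairsB l b = pvF l b := by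
  intro l
  induction l with
  | nil => intro b _; rfl
  | cons p t ih =>
    intro b hb
    obtain ⟨a1, b1, c1, d1⟩ := p
    simp only [pvPairsB, pvF]
    rw [pv_foldlB_eq a1 b1 c1 d1 t b hb]
    exact ih _ (le_trans hb (pv_le_foldl_max _ t b))

-- arithmetic facts about pvS
theorem pvS_le_of_key (a1 b1 c1 d1 a2 b2 c2 d2 res : Int)
    (h0 : 0 ≤ res) (hk : c1 + d1 - res ≤ a2 + b2) :
    pvS (a1, b1, c1, d1) (a2, b2, c2, d2) ≤ res := by
  simp only [pvS]; split_ifs with h <;> omega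

theorem pvS_le_of_small2 (a1 b1 c1 d1 a2 b2 c2 d2 res : Int)
    (h0 : 0 ≤ res) (h : c2 - a2 ≤ res ∨ d2 - b2 ≤ res) :
    pvS (a1, b1, c1, d1) (a2, b2, c2, d2) ≤ res := by
  simp only [pvS]; split_ifs with hc <;> omega

theorem pvS_le_of_small1 (a1 b1 c1 d1 a2 b2 c2 d2 res : Int)
    (h0 : 0 ≤ res) (h : c1 - a1 ≤ res ∨ d1 - b1 ≤ res) :
    pvS (a1, b1, c1, d1) (a2, b2, c2, d2) ≤ res := by
  simp only [pvS]; split_ifs with hc <;> omega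

-- A's inner loop equals the plain fold, on a suffix sorted by key x+y
theorem pvInnerA_eq (a1 b1 c1 d1 : Int) :
    ∀ (t : List (Int × Int × Int × Int)) (res : Int), 0 ≤ res →
      t.Pairwise (fun p q => p.1 + p.2.1 ≤ q.1 + q.2.1) →
      pvInnerA a1 b1 c1 d1 t res (c1 + d1 - res) =
        t.foldl (fun b q => max b (pvS (a1, b1, c1, d1) q)) res := by
  intro t
  induction t with
  | nil => intro res _ _; rfl
  | cons q t ih =>
    intro res hres hpw
    obtain ⟨a2, b2, c2, d2⟩ := q
    rw [List.pairwise_cons] at hpw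
    obtain ⟨hhead, htail⟩ := hpw
    have hmax1 : (if a2 ≤ a1 then a1 else a2) = max a1 a2 := by split_ifs <;> omega
    have hmin1 : (if c1 ≤ c2 then c1 else c2) = min c1 c2 := by split_ifs <;> omega
    have hmax2 : (if b2 ≤ b1 then b1 else b2) = max b1 b2 := by split_ifs <;> omega
    have hmin2 : (if d1 ≤ d2 then d1 else d2) = min d1 d2 := by split_ifs <;> omega
    simp only [pvInnerA, List.foldl_cons, hmax1, hmin1, hmax2, hmin2]
    split_ifs with hbrk hsm hw hh
    · -- break: everything later has key ≥ this key, so the fold never improves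
      have hq : pvS (a1, b1, c1, d1) (a2, b2, c2, d2) ≤ res :=
        pvS_le_of_key _ _ _ _ _ _ _ _ _ hres (by omega)
      rw [max_eq_left hq]
      refine (pv_foldl_max_le _ t res ?_).symm
      intro q' hq'
      obtain ⟨a', b', c', d'⟩ := q'
      refine pvS_le_of_key _ _ _ _ _ _ _ _ _ hres ?_
      have := hhead _ hq'
      simp only at this
      omega
    · rw [max_eq_left (pvS_le_of_small2 _ _ _ _ _ _ _ _ _ hres hsm)]
      exact ih res hres htail
    · -- continue: up - down ≤ res
      have hle : pvS (a1, b1, c1, d1) (a2, b2, c2, d2) ≤ res := by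
        simp only [pvS]; split_ifs with hc <;> omega
      rw [max_eq_left hle]
      exact ih res hres htail
    · -- continue: right - left ≤ res
      have hle : pvS (a1, b1, c1, d1) (a2, b2, c2, d2) ≤ res := by
        simp only [pvS]; split_ifs with hc <;> omega
      rw [max_eq_left hle]
      exact ih res hres htail
    · -- update
      have hs : pvS (a1, b1, c1, d1) (a2, b2, c2, d2) =
          min (min c1 c2 - max a1 a2) (min d1 d2 - max b1 b2) := by
        simp only [pvS]; split_ifs with hc <;> omega
      rw [hs, max_eq_right (show res ≤ min (min c1 c2 - max a1 a2) (min d1 d2 - max b1 b2) by omega)]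
      exact ih (min (min c1 c2 - max a1 a2) (min d1 d2 - max b1 b2)) (by omega) htail

theorem pvOuterA_eq :
    ∀ (l : List (Int × Int × Int × Int)) (res : Int), 0 ≤ res →
      l.Pairwise (fun p q => p.1 + p.2.1 ≤ q.1 + q.2.1) →
      pvOuterA l res = pvF l res := by
  intro l
  induction l with
  | nil => intro res _ _; rfl
  | cons p t ih =>
    intro res hres hpw
    obtain ⟨a1, b1, c1, d1⟩ := p
    rw [List.pairwise_cons] at hpw
    obtain ⟨_, htail⟩ := hpw
    simp only [pvOuterA, pvF]
    split_ifs with hg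
    · rw [pv_foldl_max_le _ t res (fun q hq => by
        obtain ⟨a2, b2, c2, d2⟩ := q
        exact pvS_le_of_small1 _ _ _ _ _ _ _ _ _ hres hg)]
      exact ih res hres htail
    · rw [pvInnerA_eq a1 b1 c1 d1 t res hres htail]
      exact ih _ (le_trans hres (pv_le_foldl_max _ t res)) htail

-- the two builds of the rectangle list agree under Pre_
theorem pv_dst_eq (bottomLeft topRight : List (List Int))
    (hpre : Pre_largestSquareArea bottomLeft topRight) :
    (PySem.List.pyRange 0 (bottomLeft.length : Int) 1).foldl
      (fun acc i => acc ++ [((pvRow bottomLeft i).1, (pvRow bottomLeft i).2,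
                             (pvRow topRight i).1, (pvRow topRight i).2)]) [] =
      (bottomLeft.zip topRight).map pvRect := by
  obtain ⟨hlen, hbl, htr⟩ := hpre
  rw [PySem.List.foldl_append_singleton_eq_map, List.nil_append, PySem.List.pyRange_one]
  apply List.ext_getElem
  · simp [Nat.min_eq_left hlen]
  · intro i h₁ h₂
    have hi : i < bottomLeft.length := by
      simpa [Nat.min_eq_left hlen] using h₂
    have hti : i < topRight.length := lt_of_lt_of_le hi hlen
    simp only [List.getElem_map, List.getElem_range, List.getElem_zip]
    have hbl2 : (bottomLeft[i]'hi).length = 2 := hbl _ (List.getElem_mem hi)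
    have htr2 : (topRight[i]'hti).length = 2 := by
      refine htr _ ?_
      have htk : i < (topRight.take bottomLeft.length).length := by
        simp [Nat.min_eq_left hlen]; omega
      have : (topRight.take bottomLeft.length)[i]'htk = topRight[i]'hti :=
        List.getElem_take
      rw [← this]
      exact List.getElem_mem htk
    obtain ⟨a, b, hab⟩ := List.length_eq_two.mp hbl2
    obtain ⟨x, y, hxy⟩ := List.length_eq_two.mp htr2
    have hrow1 : pvRow bottomLeft ((i : Nat) : Int) = (a, b) := by
      simp only [pvRow, PySem.List.pyGet?_natCast, List.getElem?_eq_getElem hi, hab]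
    have hrow2 : pvRow topRight ((i : Nat) : Int) = (x, y) := by
      simp only [pvRow, PySem.List.pyGet?_natCast, List.getElem?_eq_getElem hti, hxy]
    simp [hrow1, hrow2, hab, hxy, pvRect]

-- ===== VERDICT (by name: the statement is the Claim_ definition above) =====
theorem largestSquareArea_spec : Claim_equal_largestSquareArea := by
  intro bottomLeft topRight _ hpre
  unfold Spec_largestSquareArea
  simp only [largestSquareArea, largestSquareArea_alt]
  rw [pv_dst_eq bottomLeft topRight hpre]
  have hsortpw := PySem.List.sorted_pairwise ((bottomLeft.zip topRight).map pvRect)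
    (fun r => r.1 + r.2.1)
  have hperm := PySem.List.sorted_perm ((bottomLeft.zip topRight).map pvRect)
    (fun r => r.1 + r.2.1) false
  rw [pvOuterA_eq _ 0 le_rfl hsortpw, pvF_perm hperm 0,
    ← pvPairsB_eq_pvF ((bottomLeft.zip topRight).map pvRect) 0 le_rfl]
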